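-- pv_equiv track=rewrite | github.com/grio43/eve-source | src/_decomp/eve/client/script/parklife/overview/presetservice.py | GetMotifiedSetting
-- ===== SOURCE A (Python) =====
-- def GetMotifiedSetting(value, add, current):
--     if add:
--         if type(value) == list:
--             for each in value:
--                 if each not in current:
--                     current.append(each)
--
--         elif value not in current:
--             current.append(value)
--     elif type(value) == list:
--         for each in value:
--             while each in current:
--                 current.remove(each)
--
--     else:
--         while value in current:
--             current.remove(value)
--
--     current.sort()
--     return current
-- ===== SOURCE B (Python) =====
-- def GetMotifiedSetting(value, add, current):
--     # Sort first, then do sorted insertion / one-pass filtering (A appends or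
--     # repeatedly scans-and-removes, then sorts).  Mutates `current` in place
--     # and returns the same object, like A.
--     items = value if type(value) == list else [value]
--     current.sort()
--     if add:
--         for v in items:
--             if v not in current:
--                 i = 0
--                 while i < len(current) and current[i] < v:
--                     i += 1
--                 current.insert(i, v)
--     else:
--         current[:] = [x for x in current if x not in items]
--     return current
-- ===== Notes on version B (the rewrite author's own statement) =====
-- stated objective: alternative
-- what changed: B sorts once up front and then either inserts the new value at its sorted position or removes all occurrences with a single filtering pass, instead of A's append-then-sort and O(n^2) while/remove rescanning loop; in-place mutation is preserved.
import Mathlib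
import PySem

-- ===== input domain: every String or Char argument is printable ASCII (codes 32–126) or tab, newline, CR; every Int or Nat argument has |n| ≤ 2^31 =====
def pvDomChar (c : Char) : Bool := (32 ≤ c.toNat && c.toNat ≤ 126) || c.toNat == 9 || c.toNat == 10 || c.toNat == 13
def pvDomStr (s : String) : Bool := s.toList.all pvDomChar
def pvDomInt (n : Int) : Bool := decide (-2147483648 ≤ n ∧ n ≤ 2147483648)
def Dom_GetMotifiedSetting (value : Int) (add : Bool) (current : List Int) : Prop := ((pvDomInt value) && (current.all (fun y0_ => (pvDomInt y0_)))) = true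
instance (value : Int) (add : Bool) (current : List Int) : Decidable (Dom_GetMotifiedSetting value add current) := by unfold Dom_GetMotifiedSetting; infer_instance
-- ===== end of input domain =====

-- B sorts once up front, then inserts the value at its sorted position (add) or removes all
-- occurrences with one filtering pass, instead of A's append-then-sort / repeated while-remove.
-- Both Pythons mutate `current` in place and return it; the theorems are about the return value.

-- ===== PORT A =====
-- `while value in current: current.remove(value)` — list.remove removes the FIRST
-- occurrence, i.e. List.erase (exact: PySem.List.remove?_eq_some_erase).
def pvRemoveLoop (v : Int) (cur : List Int) : List Int :=
  if h : v ∈ cur then pvRemoveLoop v (cur.erase v) else cur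
termination_by cur.length
decreasing_by
  have h1 := List.length_erase_of_mem h
  have h2 : 0 < cur.length := List.length_pos_of_mem h
  omega

-- `value` is an int here, so `type(value) == list` is always False: only the scalar branches run.
def GetMotifiedSetting (value : Int) (add : Bool) (current : List Int) : List Int :=
  let cur :=
    if add then
      if value ∈ current then current else current ++ [value]  -- append if absent
    else
      pvRemoveLoop value current
  PySem.List.sorted cur (fun x => x) false  -- current.sort()

-- ===== PORT B =====
-- the `i = 0; while i < len and current[i] < v: i += 1; current.insert(i, v)` scan
def pvInsertSorted (v : Int) : List Int → List Int
  | [] => [v]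
  | x :: xs => if x < v then x :: pvInsertSorted v xs else v :: x :: xs

-- `items = [value]` since value is an int; the `for v in items` loop runs once.
def GetMotifiedSetting_alt (value : Int) (add : Bool) (current : List Int) : List Int :=
  let s := PySem.List.sorted current (fun x => x) false  -- current.sort()
  if add then
    if value ∈ s then s else pvInsertSorted value s
  else
    s.filter (fun x => x != value)  -- [x for x in current if x not in [value]]

-- ===== PRECONDITION & SPEC =====
def Spec_GetMotifiedSetting (value : Int) (add : Bool) (current : List Int) (out : List Int) : Prop := out = GetMotifiedSetting_alt value add current
instance (value : Int) (add : Bool) (current : List Int) (out : List Int) : Decidable (Spec_GetMotifiedSetting value add current out) := by unfold Spec_GetMotifiedSetting; infer_instance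

-- ===== CLAIM (what is proved, stated in full; the proofs are below) =====
def Claim_equal_GetMotifiedSetting : Prop := ∀ (value : Int) (add : Bool) (current : List Int), Dom_GetMotifiedSetting value add current → Spec_GetMotifiedSetting value add current (GetMotifiedSetting value add current)

-- ===== LEMMAS AND PROOFS =====

lemma pvInsertSorted_eq_orderedInsert (v : Int) (l : List Int) :
    pvInsertSorted v l = List.orderedInsert (· ≤ ·) v l := by
  induction l with
  | nil => rfl
  | cons x xs ih =>
    simp only [pvInsertSorted, List.orderedInsert]
    by_cases h : x < v
    · rw [if_pos h, if_neg (by omega), ih]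
    · rw [if_neg h, if_pos (by omega)]

lemma filter_erase_self (v : Int) (l : List Int) :
    (l.erase v).filter (fun x => x != v) = l.filter (fun x => x != v) := by
  induction l with
  | nil => rfl
  | cons x xs ih =>
    by_cases h : x = v
    · subst h; simp [List.erase_cons_head]
    · rw [List.erase_cons_tail (by simpa using h)]
      simp only [List.filter_cons]
      rw [ih]

lemma pvRemoveLoop_eq_filter (v : Int) (cur : List Int) :
    pvRemoveLoop v cur = cur.filter (fun x => x != v) := by
  induction cur using pvRemoveLoop.induct v with
  | case1 cur h ih =>
    rw [pvRemoveLoop, dif_pos h, ih, filter_erase_self]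
  | case2 cur h =>
    rw [pvRemoveLoop, dif_neg h]
    exact (List.filter_eq_self.mpr (fun a ha => by
      simp only [bne_iff_ne, ne_eq]; rintro rfl; exact h ha)).symm

lemma sorted_id_pairwise (l : List Int) :
    (PySem.List.sorted l (fun x => x) false).Pairwise (· ≤ ·) :=
  PySem.List.sorted_pairwise l (fun x => x)

theorem GetMotifiedSetting_spec : Claim_equal_GetMotifiedSetting := by
  intro value add current _
  unfold Spec_GetMotifiedSetting GetMotifiedSetting GetMotifiedSetting_alt
  simp only
  cases add with
  | false =>
    simp only [Bool.false_eq_true, if_false, pvRemoveLoop_eq_filter]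
    refine PySem.List.eq_of_perm_of_pairwise_le_of_injective (fun x => x)
      (fun _ _ h => h) ?_ ?_ ?_
    · exact ((PySem.List.sorted_perm _ _ _).trans
        ((PySem.List.sorted_perm current (fun x => x) false).filter _).symm)
    · exact sorted_id_pairwise _
    · exact (sorted_id_pairwise current).filter _
  | true =>
    simp only [if_true, PySem.List.mem_sorted]
    by_cases h : value ∈ current
    · rw [if_pos h, if_pos h]
    · rw [if_neg h, if_neg h, pvInsertSorted_eq_orderedInsert]
      refine PySem.List.eq_of_perm_of_pairwise_le_of_injective (fun x => x)
        (fun _ _ h => h) ?_ ?_ ?_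
      · refine (PySem.List.sorted_perm _ _ _).trans ?_
        refine (List.perm_append_singleton value current).trans ?_
        exact ((PySem.List.sorted_perm current (fun x => x) false).symm.cons value).trans
          (List.perm_orderedInsert _ value _).symm
      · exact sorted_id_pairwise _
      · simpa using List.Pairwise.orderedInsert (r := (· ≤ · : Int → Int → Prop)) value _ (sorted_id_pairwise current)

-- ===== VERDICT note: theorem above is the claim by name =====
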